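-- pv_equiv track=rewrite | github.com/Angela-OH/Algorithm | 백준/13460.py | count
-- ===== SOURCE A (Python) =====
-- def count(board, ball, direction, start, end, rng):
--     cnt = 0
--     if direction == 1 or direction == 2:
--         for i in range(start, end, rng):
--             if board[ball[0]][i] == '.':
--                 cnt += 1
--             elif board[ball[0]][i] == '#':
--                 break
--             elif board[ball[0]][i] == 'O':
--                 cnt = -1
--                 break
--     else:
--         for i in range(start, end, rng):
--                 if board[i][ball[1]] == '.':
--                     cnt += 1
--                 elif board[i][ball[1]] == '#':
--                     break
--                 elif board[i][ball[1]] == 'O':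
--                     cnt = -1
--                     break
--     return cnt
-- ===== SOURCE B (Python) =====
-- def count(board, ball, direction, start, end, rng):
--     if direction == 1 or direction == 2:
--         cell = lambda i: board[ball[0]][i]
--     else:
--         cell = lambda i: board[i][ball[1]]
--     idxs = range(start, end, rng)
--     stop = len(idxs)
--     for k, i in enumerate(idxs):
--         c = cell(i)
--         if c == '#' or c == 'O':
--             if c == 'O':
--                 return -1
--             stop = k
--             break
--     return sum(cell(i) == '.' for i in idxs[:stop])
-- ===== Notes on version B (the rewrite author's own statement) =====
-- stated objective: alternative
-- what changed: Splits A's single interleaved count-and-break loop into two phases: a first scan only locates the stopping boundary (hole/wall/end of range), then a second pass counts '.' over the prefix before it.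
import Mathlib
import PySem

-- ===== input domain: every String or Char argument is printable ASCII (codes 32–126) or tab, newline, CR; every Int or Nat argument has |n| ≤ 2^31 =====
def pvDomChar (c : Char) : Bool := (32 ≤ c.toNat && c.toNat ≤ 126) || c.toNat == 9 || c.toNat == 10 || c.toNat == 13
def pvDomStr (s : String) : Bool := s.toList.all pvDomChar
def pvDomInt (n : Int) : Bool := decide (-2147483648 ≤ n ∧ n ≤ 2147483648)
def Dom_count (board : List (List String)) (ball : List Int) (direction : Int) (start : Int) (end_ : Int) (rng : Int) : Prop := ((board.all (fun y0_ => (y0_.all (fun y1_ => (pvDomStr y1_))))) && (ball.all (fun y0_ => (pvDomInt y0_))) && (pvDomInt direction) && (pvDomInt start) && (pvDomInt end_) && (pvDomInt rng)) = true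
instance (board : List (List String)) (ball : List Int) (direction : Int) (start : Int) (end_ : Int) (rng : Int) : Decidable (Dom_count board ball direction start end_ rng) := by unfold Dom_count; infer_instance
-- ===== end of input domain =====

-- B first locates the stopping boundary along the direction, then counts '.' in the safe prefix in a
-- second pass (two-phase boundary-then-count instead of A's single interleaved accumulator loop).

-- board[ball[0]][i] (row move) / board[i][ball[1]] (column move); none = IndexError
def cellRow (board : List (List String)) (ball : List Int) (i : Int) : Option String :=
  (PySem.List.pyGet? ball 0).bind fun b0 =>
    (PySem.List.pyGet? board b0).bind fun row => PySem.List.pyGet? row i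

def cellCol (board : List (List String)) (ball : List Int) (i : Int) : Option String :=
  (PySem.List.pyGet? ball 1).bind fun b1 =>
    (PySem.List.pyGet? board i).bind fun row => PySem.List.pyGet? row b1

-- ===== PORT A =====
-- A's for-loop with early break; where a cell access would raise IndexError in Python (none),
-- the value is unclaimed (outside Pre_count) and the port just returns the current count
def countLoop (cell : Int → Option String) : List Int → Int → Int
  | [], cnt => cnt
  | i :: rest, cnt =>
    match cell i with
    | none => cnt
    | some c =>
      if c == "." then countLoop cell rest (cnt + 1)
      else if c == "#" then cnt
      else if c == "O" then -1
      else countLoop cell rest cnt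

def count (board : List (List String)) (ball : List Int) (direction : Int) (start : Int) (end_ : Int) (rng : Int) : Int :=
  if direction == 1 || direction == 2 then
    countLoop (cellRow board ball) (PySem.List.pyRange start end_ rng) 0
  else
    countLoop (cellCol board ball) (PySem.List.pyRange start end_ rng) 0

-- ===== PORT B =====
-- result of B's first (boundary-locating) pass: hole found, wall at position k, or ran off the line
inductive BStop where
  | hole : BStop
  | wall : Nat → BStop
  | off : BStop
deriving DecidableEq, Repr

-- B's enumerate-with-break loop; on none (Python would raise, outside Pre_count) the value is unclaimed
def bFindStop (cell : Int → Option String) : List Int → Nat → BStop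
  | [], _ => .off
  | i :: rest, k =>
    match cell i with
    | none => .off
    | some c =>
      if c == "#" || c == "O" then (if c == "O" then .hole else .wall k)
      else bFindStop cell rest (k + 1)

def count_alt (board : List (List String)) (ball : List Int) (direction : Int) (start : Int) (end_ : Int) (rng : Int) : Int :=
  let cell := if direction == 1 || direction == 2 then cellRow board ball else cellCol board ball
  let idxs := PySem.List.pyRange start end_ rng
  match bFindStop cell idxs 0 with
  | .hole => -1
  | .wall k => ((idxs.take k).countP (fun i => (cell i).getD "" == ".") : Int)
  | .off => (idxs.countP (fun i => (cell i).getD "" == ".") : Int)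

-- ===== PRECONDITION & SPEC =====
-- the cell accessor A and B scan with, chosen by direction
def cellOf (board : List (List String)) (ball : List Int) (direction : Int) : Int → Option String :=
  if direction == 1 || direction == 2 then cellRow board ball else cellCol board ball

-- a cell that is accessible and is neither wall nor hole (the scan passes through it)
def goodCell (cell : Int → Option String) (x : Int) : Bool :=
  match cell x with
  | some c => !(c == "#" || c == "O")
  | none => false

-- len(range(start, stop, step)) in closed form (0 for step = 0)
def rangeCount (start stop step : Int) : Nat :=
  if 0 < step then (if start < stop then ((stop - start + step - 1) / step).toNat else 0)
  else (if stop < start then ((start - stop + -step - 1) / -step).toNat else 0)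

-- every accessible cell has its scanned index inside [-boardMax, boardMax)
def boardMax (board : List (List String)) : Nat :=
  max board.length (board.foldr (fun r m => max r.length m) 0)

-- after 2*boardMax+2 strictly monotone steps the index has certainly left that window,
-- so checking this bounded prefix of the range decides whether the whole scan is safe
def sizeBound (board : List (List String)) : Nat := 2 * boardMax board + 2

-- Pre_ excludes exactly the inputs where Python raises: rng = 0 (range raises ValueError) and the
-- inputs where the scan reaches a cell whose access would raise IndexError before hitting '#'/'O'.
def Pre_count (board : List (List String)) (ball : List Int) (direction : Int) (start : Int) (end_ : Int) (rng : Int) : Prop :=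
  rng ≠ 0 ∧
  ∀ k, k < min (rangeCount start end_ rng) (sizeBound board) →
    (∀ j, j < k → goodCell (cellOf board ball direction) (start + rng * (j : Int)) = true) →
    (cellOf board ball direction (start + rng * (k : Int))).isSome = true
instance (board : List (List String)) (ball : List Int) (direction : Int) (start : Int) (end_ : Int) (rng : Int) : Decidable (Pre_count board ball direction start end_ rng) := by unfold Pre_count; infer_instance

def pvWitness_count : List (List String) × List Int × Int × Int × Int × Int :=
  ([[".", "#"]], [0, 0], 1, 0, 2, 1)

def Spec_count (board : List (List String)) (ball : List Int) (direction : Int) (start : Int) (end_ : Int) (rng : Int) (out : Int) : Prop := out = count_alt board ball direction start end_ rng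
instance (board : List (List String)) (ball : List Int) (direction : Int) (start : Int) (end_ : Int) (rng : Int) (out : Int) : Decidable (Spec_count board ball direction start end_ rng out) := by unfold Spec_count; infer_instance

-- ===== CLAIM (what is proved, stated in full; the proofs are below) =====
def Claim_equal_count : Prop := ∀ (board : List (List String)) (ball : List Int) (direction : Int) (start : Int) (end_ : Int) (rng : Int), Dom_count board ball direction start end_ rng → Pre_count board ball direction start end_ rng → Spec_count board ball direction start end_ rng (count board ball direction start end_ rng)

-- ===== LEMMAS AND PROOFS =====

-- structural form of "the scan never hits an inaccessible cell before a boundary"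
def scanSafe (cell : Int → Option String) : List Int → Prop
  | [] => True
  | i :: rest =>
    match cell i with
    | none => False
    | some c => c = "#" ∨ c = "O" ∨ scanSafe cell rest

theorem good_isSome (cell : Int → Option String) (x : Int) (h : goodCell cell x = true) :
    (cell x).isSome = true := by
  unfold goodCell at h
  cases hc : cell x <;> rw [hc] at h <;> simp_all

theorem scanSafe_allGood (cell : Int → Option String) (l : List Int)
    (h : ∀ j, j < l.length → goodCell cell (l.getD j 0) = true) : scanSafe cell l := by
  induction l with
  | nil => trivial
  | cons i rest ih =>
    have h0 : goodCell cell i = true := by simpa using h 0 (by simp)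
    obtain ⟨c, hc⟩ := Option.isSome_iff_exists.mp (good_isSome _ _ h0)
    have hrest : scanSafe cell rest := ih (fun j hj => by
      simpa using h (j + 1) (by simpa using Nat.succ_lt_succ hj))
    simp [scanSafe, hc, hrest]

theorem scanSafe_stop (cell : Int → Option String) (l : List Int) (k : Nat)
    (hk : k < l.length)
    (hgood : ∀ j, j < k → goodCell cell (l.getD j 0) = true)
    (hsome : (cell (l.getD k 0)).isSome = true)
    (hbad : goodCell cell (l.getD k 0) = false) : scanSafe cell l := by
  induction l generalizing k with
  | nil => simp at hk
  | cons i rest ih =>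
    cases k with
    | zero =>
      obtain ⟨c, hc⟩ := Option.isSome_iff_exists.mp (by simpa using hsome)
      unfold goodCell at hbad
      simp only [List.getD_cons_zero] at hbad
      rw [hc] at hbad
      simp at hbad
      by_cases hb : c = "#"
      · simp [scanSafe, hc, hb]
      · simp [scanSafe, hc, hbad hb]
    | succ m =>
      have h0 : goodCell cell i = true := by simpa using hgood 0 (by omega)
      obtain ⟨c, hc⟩ := Option.isSome_iff_exists.mp (good_isSome _ _ h0)
      have hrest : scanSafe cell rest :=
        ih m (by simpa using hk)
          (fun j hj => by simpa using hgood (j + 1) (by omega))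
          (by simpa using hsome) (by simpa using hbad)
      simp [scanSafe, hc, hrest]

theorem pyRange_eq_map (s e r : Int) (h : r ≠ 0) :
    PySem.List.pyRange s e r = (List.range (rangeCount s e r)).map (fun (k : Nat) => s + r * (k : Int)) := by
  unfold PySem.List.pyRange rangeCount
  rw [if_neg h]

theorem getD_map_range (g : Nat → Int) (n j : Nat) (hj : j < n) :
    ((List.range n).map g).getD j 0 = g j := by
  simp [List.getD, hj]

theorem len_le_foldr_max (board : List (List String)) (row : List String) (hm : row ∈ board) :
    row.length ≤ board.foldr (fun r m => max r.length m) 0 := by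
  induction board with
  | nil => simp at hm
  | cons b bs ih =>
    rcases List.mem_cons.mp hm with h | h
    · subst h; simp [List.foldr]
    · exact le_trans (ih h) (by simp [List.foldr])

theorem cellRow_window (board : List (List String)) (ball : List Int) (i : Int)
    (h : (cellRow board ball i).isSome = true) :
    -((boardMax board : Nat) : Int) ≤ i ∧ i < (boardMax board : Nat) := by
  unfold cellRow at h
  rcases hx : PySem.List.pyGet? ball 0 with _ | b0 <;> rw [hx] at h
  · simp at h
  replace h : ((PySem.List.pyGet? board b0).bind fun row => PySem.List.pyGet? row i).isSome = true := by
    simpa using h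
  rcases hy : PySem.List.pyGet? board b0 with _ | row <;> rw [hy] at h
  · simp at h
  replace h : (PySem.List.pyGet? row i).isSome = true := by simpa using h
  have hin : PySem.Raise.InRange row.length i := by
    by_contra hn
    rw [← PySem.List.pyGet?_eq_none_iff (xs := row)] at hn
    rw [hn] at h; simp at h
  unfold PySem.Raise.InRange at hin
  have hrow : row ∈ board := PySem.List.mem_of_pyGet?_eq_some _ hy
  have hle : row.length ≤ board.foldr (fun r m => max r.length m) 0 := len_le_foldr_max board row hrow
  have hM : board.foldr (fun r m => max r.length m) 0 ≤ boardMax board := le_max_right _ _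
  omega

theorem cellCol_window (board : List (List String)) (ball : List Int) (i : Int)
    (h : (cellCol board ball i).isSome = true) :
    -((boardMax board : Nat) : Int) ≤ i ∧ i < (boardMax board : Nat) := by
  unfold cellCol at h
  rcases hx : PySem.List.pyGet? ball 1 with _ | b1 <;> rw [hx] at h
  · simp at h
  replace h : ((PySem.List.pyGet? board i).bind fun row => PySem.List.pyGet? row b1).isSome = true := by
    simpa using h
  rcases hy : PySem.List.pyGet? board i with _ | row <;> rw [hy] at h
  · simp at h
  have hin : PySem.Raise.InRange board.length i := by
    by_contra hn
    rw [← PySem.List.pyGet?_eq_none_iff (xs := board)] at hn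
    rw [hn] at hy; simp at hy
  unfold PySem.Raise.InRange at hin
  have hM : board.length ≤ boardMax board := le_max_left _ _
  omega

theorem safe_of_pre (cell : Int → Option String) (M : Nat)
    (hwin : ∀ i, (cell i).isSome = true → -((M : Nat) : Int) ≤ i ∧ i < (M : Nat))
    (s e r : Int) (hr : r ≠ 0)
    (H : ∀ k, k < min (rangeCount s e r) (2 * M + 2) →
      (∀ j, j < k → goodCell cell (s + r * (j : Int)) = true) →
      (cell (s + r * (k : Int))).isSome = true) :
    scanSafe cell (PySem.List.pyRange s e r) := by
  rw [pyRange_eq_map s e r hr]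
  by_cases hall : ∀ k, k < min (rangeCount s e r) (2 * M + 2) → goodCell cell (s + r * (k : Int)) = true
  · by_cases hnb : rangeCount s e r ≤ 2 * M + 2
    · apply scanSafe_allGood
      intro j hj
      simp only [List.length_map, List.length_range] at hj
      rw [getD_map_range _ _ _ hj]
      exact hall j (by omega)
    · exfalso
      have h0 := hwin _ (good_isSome _ _ (hall 0 (by omega)))
      have hB := hwin _ (good_isSome _ _ (hall (2 * M + 1) (by omega)))
      rcases lt_or_gt_of_ne hr with hneg | hpos
      · have hr1 : r ≤ -1 := by omega
        have : r * ((2 * M + 1 : Nat) : Int) ≤ -(((2 * M + 1 : Nat) : Int)) := by nlinarith [Int.natCast_nonneg (2 * M + 1)]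
        omega
      · have hr1 : 1 ≤ r := by omega
        have : ((2 * M + 1 : Nat) : Int) ≤ r * ((2 * M + 1 : Nat) : Int) := by nlinarith [Int.natCast_nonneg (2 * M + 1)]
        omega
  · rcases not_forall.mp hall with ⟨k, hk⟩
    rw [Classical.not_imp] at hk
    have hex : ∃ k, k < min (rangeCount s e r) (2 * M + 2) ∧ ¬ goodCell cell (s + r * (k : Int)) = true := ⟨k, hk.1, hk.2⟩
    have hk0 := Nat.find_spec hex
    have hmin : ∀ j, j < Nat.find hex → goodCell cell (s + r * (j : Int)) = true := by
      intro j hj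
      by_contra hbad
      exact Nat.find_min hex hj ⟨by omega, hbad⟩
    have hsome := H (Nat.find hex) hk0.1 hmin
    apply scanSafe_stop cell _ (Nat.find hex)
    · simp only [List.length_map, List.length_range]; omega
    · intro j hj
      rw [getD_map_range _ _ _ (by omega)]
      exact hmin j hj
    · rw [getD_map_range _ _ _ (by omega)]
      exact hsome
    · rw [getD_map_range _ _ _ (by omega)]
      exact Bool.not_eq_true _ ▸ (by simpa using hk0.2)

theorem bFindStop_shift (cell : Int → Option String) (l : List Int) (k : Nat) :
    bFindStop cell l (k + 1) =
      match bFindStop cell l k with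
      | .wall j => .wall (j + 1)
      | r => r := by
  induction l generalizing k with
  | nil => simp [bFindStop]
  | cons i rest ih =>
    simp only [bFindStop]
    cases cell i with
    | none => simp
    | some c =>
      by_cases hb : (c == "#" || c == "O") = true
      · simp [hb]; split_ifs <;> rfl
      · simp [hb, ih]

theorem loop_eq_alt (cell : Int → Option String) (l : List Int)
    (hs : scanSafe cell l) (cnt : Int) :
    countLoop cell l cnt =
      match bFindStop cell l 0 with
      | .hole => -1
      | .wall k => cnt + ((l.take k).countP (fun i => (cell i).getD "" == ".") : Int)
      | .off => cnt + (l.countP (fun i => (cell i).getD "" == ".") : Int) := by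
  induction l generalizing cnt with
  | nil => simp [countLoop, bFindStop]
  | cons i rest ih =>
    unfold scanSafe at hs
    cases hc : cell i with
    | none => rw [hc] at hs; exact absurd hs (by simp)
    | some c =>
      rw [hc] at hs
      by_cases hh : c = "O"
      · simp [countLoop, bFindStop, hc, hh]
      by_cases hw : c = "#"
      · simp [countLoop, bFindStop, hc, hw, List.countP]
      have hrest : scanSafe cell rest := by
        rcases hs with h | h | h
        · exact absurd h hw
        · exact absurd h hh
        · exact h
      have hb : (c == "#" || c == "O") = false := by simp [hw, hh]
      by_cases hd : c = "."
      · simp only [countLoop, bFindStop, hc, hd]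
        norm_num
        rw [ih hrest (cnt + 1), bFindStop_shift]
        cases hf : bFindStop cell rest 0 with
        | hole => simp
        | wall k =>
          simp [hc, hd]
          ring
        | off =>
          simp [hc, hd]
          ring
      · simp only [countLoop, bFindStop, hc, hb]
        have hdb : (c == ".") = false := by simp [hd]
        simp only [hdb]
        norm_num
        rw [ih hrest cnt, bFindStop_shift]
        cases hf : bFindStop cell rest 0 with
        | hole => simp [hw, hh]
        | wall k =>
          simp [hc, hd, hw, hh]
        | off =>
          simp [hc, hd, hw, hh]

-- ===== VERDICT (by name: the statement is the Claim_ definition above) =====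
theorem count_spec : Claim_equal_count := by
  intro board ball direction start end_ rng _ hpre
  unfold Spec_count count count_alt
  obtain ⟨hrng, hall⟩ := hpre
  unfold cellOf sizeBound at hall
  by_cases hdir : (direction == 1 || direction == 2) = true
  · simp only [hdir, if_true] at hall ⊢
    rw [loop_eq_alt _ _ (safe_of_pre (cellRow board ball) (boardMax board)
      (fun i h => cellRow_window board ball i h) start end_ rng hrng hall)]
    cases bFindStop _ _ 0 <;> simp
  · simp only [hdir, if_false, Bool.false_eq_true] at hall ⊢
    rw [loop_eq_alt _ _ (safe_of_pre (cellCol board ball) (boardMax board)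
      (fun i h => cellCol_window board ball i h) start end_ rng hrng hall)]
    cases bFindStop _ _ 0 <;> simp
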